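-- pv_equiv track=rewrite | github.com/davidrgntm/jelly-follow | app/services/notifications_service.py | _format_rewards
-- ===== SOURCE A (Python) =====
-- def _format_rewards(rewards, lang: str) -> str:
--     if not rewards:
--         return "-"
--     seen = set()
--     lines = []
--     for reward in sorted(rewards, key=lambda r: int(r.get("place_number", 999999) or 999999)):
--         key = (
--             str(reward.get("place_number", "")),
--             str(reward.get("reward_title", "")).strip(),
--             str(reward.get("reward_amount", "")).strip(),
--             str(reward.get("currency_code", "")).strip(),
--         )
--         if key in seen:
--             continue
--         seen.add(key)
--         place = str(reward.get("place_number", "")).strip() or "-"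
--         title = str(reward.get("reward_title", "")).strip()
--         amount = str(reward.get("reward_amount", "")).strip()
--         currency = str(reward.get("currency_code", "")).strip()
--         parts = []
--         low = title.lower()
--         if title and low not in {f"{place}-place", f"{place}-o'rin", f"{place}-orin"}:
--             parts.append(title)
--         if amount:
--             parts.append(f"{amount} {currency}".strip())
--         lines.append(f"• {place}-o'rin — <b>{' — '.join(parts) if parts else '-'}</b>")
--     return "\n".join(lines) or "-"
-- ===== SOURCE B (Python) =====
-- def _format_line(key):
--     place = key[0].strip() or "-"
--     title, amount, currency = key[1], key[2], key[3]
--     parts = []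
--     if title and title.lower() not in {f"{place}-place", f"{place}-o'rin", f"{place}-orin"}:
--         parts.append(title)
--     if amount:
--         parts.append(f"{amount} {currency}".strip())
--     return f"• {place}-o'rin — <b>{' — '.join(parts) if parts else '-'}</b>"
--
--
-- def _format_rewards(rewards, lang: str) -> str:
--     # Bucket (group) sort: one pass groups rewards by the integer place number,
--     # deduplicating per bucket via a nested insertion-ordered dict; only the
--     # distinct place numbers are comparison-sorted.
--     buckets = {}
--     for reward in rewards:
--         key = (
--             str(reward.get("place_number", "")),
--             str(reward.get("reward_title", "")).strip(),
--             str(reward.get("reward_amount", "")).strip(),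
--             str(reward.get("currency_code", "")).strip(),
--         )
--         n = int(key[0]) if key[0] else 999999
--         buckets.setdefault(n, {})[key] = None
--     lines = [_format_line(key) for n in sorted(buckets) for key in buckets[n]]
--     return "\n".join(lines) or "-"
-- ===== Notes on version B (the rewrite author's own statement) =====
-- stated objective: alternative
-- what changed: B replaces A's comparison sort of all rewards plus a global seen-set pass by a bucket (group) sort: one pass groups rewards into a dict keyed by the integer place number (deduplicating per bucket via a nested insertion-ordered dict), then only the distinct place numbers are sorted and the buckets are emitted in numeric order.
import Mathlib
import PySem

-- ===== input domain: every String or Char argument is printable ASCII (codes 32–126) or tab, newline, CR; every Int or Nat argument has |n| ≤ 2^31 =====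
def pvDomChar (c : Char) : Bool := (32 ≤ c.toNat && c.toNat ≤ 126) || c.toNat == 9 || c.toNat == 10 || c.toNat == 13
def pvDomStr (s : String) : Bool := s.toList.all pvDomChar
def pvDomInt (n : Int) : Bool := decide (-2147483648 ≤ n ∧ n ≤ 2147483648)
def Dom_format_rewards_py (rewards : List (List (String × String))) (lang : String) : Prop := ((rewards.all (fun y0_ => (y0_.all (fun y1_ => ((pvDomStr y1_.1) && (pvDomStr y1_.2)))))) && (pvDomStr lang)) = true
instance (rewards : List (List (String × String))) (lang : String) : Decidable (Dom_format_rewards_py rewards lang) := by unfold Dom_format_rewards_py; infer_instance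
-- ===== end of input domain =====

-- B replaces A's comparison sort + global seen-set pass by a bucket (group) sort: one pass groups
-- rewards by the integer place number into a dict of nested dicts (per-bucket dedup), then sorts
-- only the distinct place numbers; objective: alternative algorithm.

-- shared helper: Python's reward.get(k) on the association list (first match)
def pvGet (r : List (String × String)) (k : String) : Option String :=
  (r.find? (fun p => p.1 == k)).map (·.2)

-- the four-field key tuple both programs compute
abbrev pvKeyT : Type := String × String × String × String

-- ===== PORT A =====
-- sort key of A: int(r.get("place_number", 999999) or 999999); ValueError (= none) excluded by Pre_
def pvSortKeyA (r : List (String × String)) : Int :=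
  match pvGet r "place_number" with
  | none => 999999
  | some s => if s = "" then 999999 else (PySem.Int.ofStr? s).getD 0

-- the body of A's for-loop: state = (seen, lines)
def pvStepA (st : PySem.Set pvKeyT × List String) (reward : List (String × String)) :
    PySem.Set pvKeyT × List String :=
  let key : pvKeyT :=
    ((pvGet reward "place_number").getD "",
     PySem.Str.strip ((pvGet reward "reward_title").getD ""),
     PySem.Str.strip ((pvGet reward "reward_amount").getD ""),
     PySem.Str.strip ((pvGet reward "currency_code").getD ""))
  if PySem.Set.contains st.1 key then st
  else
    let place0 := PySem.Str.strip ((pvGet reward "place_number").getD "")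
    let place := if place0 = "" then "-" else place0
    let title := PySem.Str.strip ((pvGet reward "reward_title").getD "")
    let amount := PySem.Str.strip ((pvGet reward "reward_amount").getD "")
    let currency := PySem.Str.strip ((pvGet reward "currency_code").getD "")
    let low := PySem.Str.lower title
    let parts : List String :=
      (if title ≠ "" ∧ low ≠ place ++ "-place" ∧ low ≠ place ++ "-o'rin" ∧ low ≠ place ++ "-orin"
       then [title] else []) ++
      (if amount ≠ "" then [PySem.Str.strip (amount ++ " " ++ currency)] else [])
    (PySem.Set.add st.1 key,
     st.2 ++ ["• " ++ place ++ "-o'rin — <b>" ++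
              (if parts = [] then "-" else PySem.Str.join " — " parts) ++ "</b>"])

def format_rewards_py (rewards : List (List (String × String))) (lang : String) : String :=
  if rewards = [] then "-"
  else
    let st := (PySem.List.sorted rewards pvSortKeyA).foldl pvStepA (PySem.Set.empty, [])
    let out := PySem.Str.join "\n" st.2
    if out = "" then "-" else out

-- ===== PORT B =====
def pvKey (reward : List (String × String)) : pvKeyT :=
  ((pvGet reward "place_number").getD "",
   PySem.Str.strip ((pvGet reward "reward_title").getD ""),
   PySem.Str.strip ((pvGet reward "reward_amount").getD ""),
   PySem.Str.strip ((pvGet reward "currency_code").getD ""))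

-- n = int(key[0]) if key[0] else 999999 (ValueError excluded by Pre_)
def pvSortKeyB (k : pvKeyT) : Int :=
  if k.1 = "" then 999999 else (PySem.Int.ofStr? k.1).getD 0

def pvFormatLine (k : pvKeyT) : String :=
  let place0 := PySem.Str.strip k.1
  let place := if place0 = "" then "-" else place0
  let title := k.2.1
  let amount := k.2.2.1
  let currency := k.2.2.2
  let low := PySem.Str.lower title
  let parts : List String :=
    (if title ≠ "" ∧ low ≠ place ++ "-place" ∧ low ≠ place ++ "-o'rin" ∧ low ≠ place ++ "-orin"
     then [title] else []) ++
    (if amount ≠ "" then [PySem.Str.strip (amount ++ " " ++ currency)] else [])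
  "• " ++ place ++ "-o'rin — <b>" ++
    (if parts = [] then "-" else PySem.Str.join " — " parts) ++ "</b>"

-- buckets.setdefault(n, {})[key] = None  ==  buckets[n] = buckets.get(n, {}) with key inserted,
-- i.e. Dict.modify n empty (·.insert key ())
def pvStepB (d : PySem.Dict Int (PySem.Dict pvKeyT Unit)) (reward : List (String × String)) :
    PySem.Dict Int (PySem.Dict pvKeyT Unit) :=
  let key := pvKey reward
  let n := pvSortKeyB key
  d.modify n PySem.Dict.empty (fun b => b.insert key ())

def format_rewards_py_alt (rewards : List (List (String × String))) (lang : String) : String :=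
  let buckets := rewards.foldl pvStepB PySem.Dict.empty
  -- buckets[n] for n in sorted(buckets) always succeeds (n is a key); getD with empty default is exact here
  let lines := (PySem.List.sorted buckets.keys (fun x => x)).flatMap
    (fun n => (buckets.getD n PySem.Dict.empty).keys.map pvFormatLine)
  let out := PySem.Str.join "\n" lines
  if out = "" then "-" else out

-- ===== PRECONDITION & SPEC =====
-- Pre_ excludes exactly the inputs where A raises ValueError: some reward carries a non-empty
-- "place_number" string that int() cannot parse (B raises there too).
def Pre_format_rewards_py (rewards : List (List (String × String))) (lang : String) : Prop :=
  ∀ r ∈ rewards, ∀ s, pvGet r "place_number" = some s → s ≠ "" → (PySem.Int.ofStr? s).isSome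
instance (rewards : List (List (String × String))) (lang : String) : Decidable (Pre_format_rewards_py rewards lang) := by unfold Pre_format_rewards_py; infer_instance

def pvWitness_format_rewards_py : (List (List (String × String))) × String :=
  ([[("place_number", "1"), ("reward_title", "Gold"), ("reward_amount", "100"), ("currency_code", "USD")],
    [("place_number", "2"), ("reward_title", "2-place")],
    [("place_number", "1"), ("reward_title", "Gold"), ("reward_amount", "100"), ("currency_code", "USD")]], "uz")

def Spec_format_rewards_py (rewards : List (List (String × String))) (lang : String) (out : String) : Prop := out = format_rewards_py_alt rewards lang
instance (rewards : List (List (String × String))) (lang : String) (out : String) : Decidable (Spec_format_rewards_py rewards lang out) := by unfold Spec_format_rewards_py; infer_instance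

-- ===== CLAIM (what is proved, stated in full; the proofs are below) =====
def Claim_equal_format_rewards_py : Prop := ∀ (rewards : List (List (String × String))) (lang : String), Dom_format_rewards_py rewards lang → Pre_format_rewards_py rewards lang → Spec_format_rewards_py rewards lang (format_rewards_py rewards lang)

-- ===== LEMMAS AND PROOFS =====

-- first-occurrence dedup relative to a list of already-seen keys (proof-side model of both
-- A's seen-set loop and B's nested dicts)
def pvDedupSeen (seen : List pvKeyT) (l : List pvKeyT) : List pvKeyT :=
  match l with
  | [] => []
  | y :: t => if seen.contains y then pvDedupSeen seen t else y :: pvDedupSeen (y :: seen) t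

-- A's comparison order on keys, and the buckets / sorted distinct place numbers
def pvB (a c : pvKeyT) : Bool := decide (pvSortKeyB a < pvSortKeyB c)
def pvBuck (l : List pvKeyT) (n : Int) : List pvKeyT := l.filter (fun k => pvSortKeyB k == n)
def pvSI (l : List pvKeyT) : List Int :=
  PySem.List.sorted (PySem.Set.ofList (l.map pvSortKeyB)) (fun x => x)

theorem pvDedupSeen_cons_pos {seen : List pvKeyT} {y : pvKeyT} {t : List pvKeyT}
    (h : seen.contains y = true) : pvDedupSeen seen (y :: t) = pvDedupSeen seen t := by
  simp only [pvDedupSeen, h]; simp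

theorem pvDedupSeen_cons_neg {seen : List pvKeyT} {y : pvKeyT} {t : List pvKeyT}
    (h : seen.contains y = false) :
    pvDedupSeen seen (y :: t) = y :: pvDedupSeen (y :: seen) t := by
  simp only [pvDedupSeen, h]; simp

theorem pvDedupSeen_congr (l : List pvKeyT) : ∀ s₁ s₂ : List pvKeyT,
    (∀ a, s₁.contains a = s₂.contains a) → pvDedupSeen s₁ l = pvDedupSeen s₂ l := by
  induction l with
  | nil => intro _ _ _; rfl
  | cons y t ih =>
    intro s₁ s₂ h
    cases hy : s₁.contains y
    · rw [pvDedupSeen_cons_neg hy, pvDedupSeen_cons_neg (by rw [← h y]; exact hy)]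
      exact congrArg _ (ih _ _ (by intro a; simp only [List.contains_cons, h a]))
    · rw [pvDedupSeen_cons_pos hy, pvDedupSeen_cons_pos (by rw [← h y]; exact hy)]
      exact ih _ _ h

theorem pvDedupSeen_congr_mem (l : List pvKeyT) : ∀ s₁ s₂ : List pvKeyT,
    (∀ a ∈ l, s₁.contains a = s₂.contains a) → pvDedupSeen s₁ l = pvDedupSeen s₂ l := by
  induction l with
  | nil => intro _ _ _; rfl
  | cons y t ih =>
    intro s₁ s₂ h
    cases hy : s₁.contains y
    · rw [pvDedupSeen_cons_neg hy,
        pvDedupSeen_cons_neg (by rw [← h y List.mem_cons_self]; exact hy)]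
      refine congrArg _ (ih _ _ ?_)
      intro a ha
      simp only [List.contains_cons, h a (List.mem_cons_of_mem _ ha)]
    · rw [pvDedupSeen_cons_pos hy,
        pvDedupSeen_cons_pos (by rw [← h y List.mem_cons_self]; exact hy)]
      exact ih _ _ (fun a ha => h a (List.mem_cons_of_mem _ ha))

theorem pvDedupSeen_append (L1 L2 : List pvKeyT) : ∀ seen,
    pvDedupSeen seen (L1 ++ L2) =
      pvDedupSeen seen L1 ++ pvDedupSeen (L1.reverse ++ seen) L2 := by
  induction L1 with
  | nil => intro seen; simp [pvDedupSeen]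
  | cons y t ih =>
    intro seen
    rw [List.cons_append]
    cases hy : seen.contains y
    · rw [pvDedupSeen_cons_neg hy, pvDedupSeen_cons_neg hy, ih (y :: seen), List.cons_append]
      have : (y :: t).reverse ++ seen = t.reverse ++ y :: seen := by
        rw [List.reverse_cons, List.append_assoc]; rfl
      rw [this]
    · rw [pvDedupSeen_cons_pos hy, pvDedupSeen_cons_pos hy, ih seen]
      refine congrArg _ (pvDedupSeen_congr L2 _ _ (fun a => ?_))
      rw [List.reverse_cons, List.append_assoc, List.contains_append, List.contains_append,
        List.singleton_append, List.contains_cons]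
      cases hay : a == y
      · simp
      · have : seen.contains a = true := by
          have : a = y := eq_of_beq hay
          rw [this]; exact hy
        rw [this]; simp

-- Set.ofList is pvDedupSeen []
theorem pvDedup_foldl (ks : List pvKeyT) : ∀ acc : List pvKeyT,
    ks.foldl PySem.Set.add acc = acc ++ pvDedupSeen acc ks := by
  induction ks with
  | nil => intro acc; simp [pvDedupSeen]
  | cons y t ih =>
    intro acc
    rw [List.foldl_cons]
    cases hy : List.contains acc y
    · have hadd : PySem.Set.add acc y = acc ++ [y] := by
        simp only [PySem.Set.add, PySem.Set.contains, hy]; simp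
      rw [hadd, ih (acc ++ [y]), pvDedupSeen_cons_neg hy]
      have h2 : pvDedupSeen (acc ++ [y]) t = pvDedupSeen (y :: acc) t :=
        pvDedupSeen_congr t _ _ (fun a => by
          rw [List.contains_append, List.contains_cons, List.contains_cons, List.contains_nil,
            Bool.or_false, Bool.or_comm])
      rw [h2, List.append_assoc]
      rfl
    · have hadd : PySem.Set.add acc y = acc := by
        simp only [PySem.Set.add, PySem.Set.contains, hy]; simp
      rw [hadd, ih acc, pvDedupSeen_cons_pos hy]

theorem pvOfList_eq (ks : List pvKeyT) : PySem.Set.ofList ks = pvDedupSeen [] ks := by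
  have := pvDedup_foldl ks []
  simpa [PySem.Set.ofList_eq_foldl] using this

-- A's loop step, phrased through the key tuple and the line formatter
theorem pvStepA_eq (st : PySem.Set pvKeyT × List String) (r : List (String × String)) :
    pvStepA st r = if List.contains st.1 (pvKey r) then st
      else (PySem.Set.add st.1 (pvKey r), st.2 ++ [pvFormatLine (pvKey r)]) := rfl

theorem pvStepA_pos (st : PySem.Set pvKeyT × List String) (r : List (String × String))
    (h : List.contains st.1 (pvKey r) = true) : pvStepA st r = st := by
  rw [pvStepA_eq, if_pos h]

theorem pvStepA_neg (st : PySem.Set pvKeyT × List String) (r : List (String × String))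
    (h : List.contains st.1 (pvKey r) = false) :
    pvStepA st r = (PySem.Set.add st.1 (pvKey r), st.2 ++ [pvFormatLine (pvKey r)]) := by
  rw [pvStepA_eq, if_neg (by rw [h]; exact Bool.false_ne_true)]

-- A's loop collects exactly the formatted first occurrences
theorem pvFoldA (rs : List (List (String × String))) :
    ∀ (seen : PySem.Set pvKeyT) (lines : List String),
    (rs.foldl pvStepA (seen, lines)).2 =
      lines ++ (pvDedupSeen seen (rs.map pvKey)).map pvFormatLine := by
  induction rs with
  | nil => intro seen lines; simp [pvDedupSeen]
  | cons r t ih =>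
    intro seen lines
    rw [List.foldl_cons, List.map_cons]
    cases h : List.contains seen (pvKey r)
    · rw [pvStepA_neg (seen, lines) r h]
      have hadd : PySem.Set.add seen (pvKey r) = seen ++ [pvKey r] := by
        simp only [PySem.Set.add, PySem.Set.contains, h]; simp
      rw [hadd, ih, pvDedupSeen_cons_neg h]
      have h2 : pvDedupSeen (seen ++ [pvKey r]) (t.map pvKey) =
          pvDedupSeen (pvKey r :: seen) (t.map pvKey) :=
        pvDedupSeen_congr _ _ _ (fun a => by
          rw [List.contains_append, List.contains_cons, List.contains_cons, List.contains_nil,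
            Bool.or_false, Bool.or_comm])
      rw [h2]
      simp
    · rw [pvStepA_pos (seen, lines) r h, ih, pvDedupSeen_cons_pos h]

-- A's sort key factors through the key tuple
theorem pvSortKey_eq (r : List (String × String)) : pvSortKeyA r = pvSortKeyB (pvKey r) := by
  simp only [pvSortKeyA, pvSortKeyB, pvKey]
  cases pvGet r "place_number" with
  | none => simp
  | some s => simp

-- sorting rewards then taking keys = sorting the keys
theorem pvInsertBy_cons_gen {α : Type} (before : α → α → Bool) (x y : α) (t : List α) :
    PySem.List.insertBy before x (y :: t) =
      if before x y then x :: y :: t else y :: PySem.List.insertBy before x t := rfl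

theorem pvMap_insertBy (l : List (List (String × String))) (x : List (String × String)) :
    (PySem.List.insertBy (fun a c => decide (pvSortKeyB (pvKey a) < pvSortKeyB (pvKey c))) x l).map pvKey =
      PySem.List.insertBy pvB (pvKey x) (l.map pvKey) := by
  induction l with
  | nil => rfl
  | cons y t ih =>
    rw [List.map_cons, pvInsertBy_cons_gen, pvInsertBy_cons_gen]
    cases hb : decide (pvSortKeyB (pvKey x) < pvSortKeyB (pvKey y))
    · have hbB : pvB (pvKey x) (pvKey y) = false := hb
      rw [if_neg (fun hc => Bool.false_ne_true hc),
        if_neg (by rw [hbB]; exact fun hc => Bool.false_ne_true hc), List.map_cons, ih]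
    · have hbB : pvB (pvKey x) (pvKey y) = true := hb
      rw [if_pos rfl, if_pos hbB, List.map_cons, List.map_cons]

theorem pvFoldMap (rs : List (List (String × String))) :
    ∀ acc : List (List (String × String)),
    (rs.foldl (fun acc x => PySem.List.insertBy
        (fun a c => decide (pvSortKeyB (pvKey a) < pvSortKeyB (pvKey c))) x acc) acc).map pvKey =
      (rs.map pvKey).foldl (fun acc x => PySem.List.insertBy pvB x acc) (acc.map pvKey) := by
  induction rs with
  | nil => intro acc; rfl
  | cons r t ih =>
    intro acc
    rw [List.foldl_cons, List.map_cons, List.foldl_cons, ih, pvMap_insertBy]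

theorem pvMap_sorted (rs : List (List (String × String))) :
    (PySem.List.sorted rs pvSortKeyA).map pvKey =
      PySem.List.sorted (rs.map pvKey) pvSortKeyB := by
  have h1 : PySem.List.sorted rs pvSortKeyA =
      rs.foldl (fun acc x => PySem.List.insertBy
        (fun a c => decide (pvSortKeyB (pvKey a) < pvSortKeyB (pvKey c))) x acc) [] := by
    rw [PySem.List.sorted_eq_foldl_insertBy]
    simp only [pvSortKey_eq]
  rw [h1, PySem.List.sorted_eq_foldl_insertBy]
  exact pvFoldMap rs []

-- insertBy skips a prefix it is not ordered before
theorem pvInsertBy_append_left (L1 L2 : List pvKeyT) (x : pvKeyT)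
    (h : ∀ e ∈ L1, pvB x e = false) :
    PySem.List.insertBy pvB x (L1 ++ L2) = L1 ++ PySem.List.insertBy pvB x L2 := by
  induction L1 with
  | nil => rfl
  | cons y t ih =>
    rw [List.cons_append, pvInsertBy_cons_gen,
      if_neg (by rw [h y List.mem_cons_self]; exact fun hc => Bool.false_ne_true hc),
      ih (fun e he => h e (List.mem_cons_of_mem _ he)), List.cons_append]

-- bucket facts
theorem pvBuck_append (l : List pvKeyT) (x : pvKeyT) (n : Int) :
    pvBuck (l ++ [x]) n = pvBuck l n ++ (if pvSortKeyB x = n then [x] else []) := by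
  simp only [pvBuck, List.filter_append, List.filter_cons, List.filter_nil]
  cases h : pvSortKeyB x == n
  · have h' : ¬ pvSortKeyB x = n := by simpa using h
    rw [if_neg h']
    simp
  · rw [if_pos (eq_of_beq h)]
    simp

theorem pvBuck_key (l : List pvKeyT) (n : Int) : ∀ e ∈ pvBuck l n, pvSortKeyB e = n := by
  intro e he
  have := List.of_mem_filter he
  simpa using this

theorem pvContains_eq_false {α : Type} [BEq α] [LawfulBEq α] {l : List α} {a : α}
    (h : a ∉ l) : l.contains a = false := by
  cases hc : l.contains a
  · rfl
  · exact absurd (List.mem_of_elem_eq_true hc) h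

theorem pvFlatMap_congr {α β : Type} {ns : List α} {f g : α → List β}
    (h : ∀ n ∈ ns, f n = g n) : ns.flatMap f = ns.flatMap g := by
  induction ns with
  | nil => rfl
  | cons n t ih =>
    rw [List.flatMap_cons, List.flatMap_cons, h n List.mem_cons_self,
      ih (fun m hm => h m (List.mem_cons_of_mem _ hm))]

-- stable sort = concatenation of buckets over the sorted distinct keys: the two insert steps
theorem pvInsert_flatMap_mem (ns : List Int) (l : List pvKeyT) (x : pvKeyT)
    (hinc : ns.Pairwise (· < ·))
    (hne : ∀ n ∈ ns, pvBuck l n ≠ [])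
    (hmem : pvSortKeyB x ∈ ns) :
    PySem.List.insertBy pvB x (ns.flatMap (pvBuck l)) = ns.flatMap (pvBuck (l ++ [x])) := by
  induction ns with
  | nil => cases hmem
  | cons n0 t ih =>
    have hp := List.pairwise_cons.1 hinc
    rw [List.flatMap_cons, List.flatMap_cons]
    by_cases hx0 : pvSortKeyB x = n0
    · -- x joins the head bucket (placed after it, before the rest)
      have hskip : ∀ e ∈ pvBuck l n0, pvB x e = false := by
        intro e he
        simp only [pvB, pvBuck_key l n0 e he, hx0, decide_eq_false_iff_not]
        omega
      rw [pvInsertBy_append_left _ _ _ hskip, pvBuck_append, if_pos hx0]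
      have hrest : t.flatMap (pvBuck (l ++ [x])) = t.flatMap (pvBuck l) := by
        refine pvFlatMap_congr (fun m hm => ?_)
        rw [pvBuck_append, if_neg (by have := hp.1 m hm; omega)]
        simp
      rw [hrest]
      cases ht : t with
      | nil => simp [PySem.List.insertBy]
      | cons n1 t' =>
        have hne1 : pvBuck l n1 ≠ [] := hne n1 (by rw [ht]; exact List.mem_cons_of_mem _ List.mem_cons_self)
        cases hb1 : pvBuck l n1 with
        | nil => exact absurd hb1 hne1
        | cons e1 es =>
          have hfront : pvB x e1 = true := by
            have hk := pvBuck_key l n1 e1 (by rw [hb1]; exact List.mem_cons_self)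
            have hlt : n0 < n1 := hp.1 n1 (by rw [ht]; exact List.mem_cons_self)
            simp only [pvB, hk, hx0, decide_eq_true_eq]
            omega
          rw [List.flatMap_cons, hb1, List.cons_append, pvInsertBy_cons_gen, if_pos hfront]
          simp
    · -- skip the head bucket and recurse
      have hxt : pvSortKeyB x ∈ t := by
        rcases List.mem_cons.1 hmem with h | h
        · exact absurd h hx0
        · exact h
      have hlt0 : n0 < pvSortKeyB x := hp.1 _ hxt
      have hskip : ∀ e ∈ pvBuck l n0, pvB x e = false := by
        intro e he
        simp only [pvB, pvBuck_key l n0 e he, decide_eq_false_iff_not]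
        omega
      rw [pvInsertBy_append_left _ _ _ hskip,
        ih hp.2 (fun n hn => hne n (List.mem_cons_of_mem _ hn)) hxt,
        pvBuck_append, if_neg (fun h => hx0 h), List.append_nil]

theorem pvInsert_flatMap_new (ns : List Int) (l : List pvKeyT) (x : pvKeyT)
    (hinc : ns.Pairwise (· < ·))
    (hne : ∀ n ∈ ns, pvBuck l n ≠ [])
    (hempty : pvBuck l (pvSortKeyB x) = [])
    (hnot : pvSortKeyB x ∉ ns) :
    PySem.List.insertBy pvB x (ns.flatMap (pvBuck l)) =
      (PySem.List.insertBy (fun a c => decide (a < c)) (pvSortKeyB x) ns).flatMap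
        (pvBuck (l ++ [x])) := by
  induction ns with
  | nil =>
    show [x] = pvBuck (l ++ [x]) (pvSortKeyB x) ++ []
    rw [pvBuck_append, if_pos rfl, hempty]
    simp
  | cons n0 t ih =>
    have hp := List.pairwise_cons.1 hinc
    have hx0 : pvSortKeyB x ≠ n0 := fun h => hnot (h ▸ List.mem_cons_self)
    rw [List.flatMap_cons, pvInsertBy_cons_gen]
    rcases lt_or_gt_of_ne hx0 with hlt | hgt
    · -- new place number goes first
      rw [if_pos (by simpa using hlt), List.flatMap_cons, pvBuck_append, if_pos rfl, hempty,
        List.nil_append, List.flatMap_cons]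
      have hrest : ∀ m ∈ n0 :: t, pvBuck (l ++ [x]) m = pvBuck l m := by
        intro m hm
        rw [pvBuck_append]
        rcases List.mem_cons.1 hm with h | h
        · rw [if_neg (by omega)]; simp
        · rw [if_neg (by have := hp.1 m h; omega)]; simp
      rw [hrest n0 List.mem_cons_self,
        pvFlatMap_congr (fun m hm => hrest m (List.mem_cons_of_mem _ hm))]
      have hne0 : pvBuck l n0 ≠ [] := hne n0 List.mem_cons_self
      cases hb0 : pvBuck l n0 with
      | nil => exact absurd hb0 hne0
      | cons e0 es =>
        have hfront : pvB x e0 = true := by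
          have hk := pvBuck_key l n0 e0 (by rw [hb0]; exact List.mem_cons_self)
          simp only [pvB, hk, decide_eq_true_eq]
          omega
        rw [List.cons_append, pvInsertBy_cons_gen, if_pos hfront]
        simp
    · -- skip the head bucket and recurse
      rw [if_neg (by simp; omega)]
      have hskip : ∀ e ∈ pvBuck l n0, pvB x e = false := by
        intro e he
        simp only [pvB, pvBuck_key l n0 e he, decide_eq_false_iff_not]
        omega
      rw [pvInsertBy_append_left _ _ _ hskip,
        ih hp.2 (fun n hn => hne n (List.mem_cons_of_mem _ hn))
          (fun h => hnot (List.mem_cons_of_mem _ h)),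
        List.flatMap_cons, pvBuck_append, if_neg (fun h => hx0 h), List.append_nil]

theorem pvSI_pairwise (l : List pvKeyT) : (pvSI l).Pairwise (· < ·) :=
  PySem.List.sorted_ofList_pairwise_lt (l.map pvSortKeyB)

theorem pvSI_mem (l : List pvKeyT) (n : Int) : n ∈ pvSI l ↔ n ∈ l.map pvSortKeyB := by
  rw [pvSI, PySem.List.mem_sorted, PySem.Set.mem_ofList]

theorem pvSI_ne (l : List pvKeyT) : ∀ n ∈ pvSI l, pvBuck l n ≠ [] := by
  intro n hn hnil
  rcases List.mem_map.1 ((pvSI_mem l n).1 hn) with ⟨k, hk, hgk⟩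
  have : k ∈ pvBuck l n := List.mem_filter.2 ⟨hk, by simp [hgk]⟩
  rw [hnil] at this
  cases this

theorem pvSorted_buckets (l : List pvKeyT) :
    PySem.List.sorted l pvSortKeyB = (pvSI l).flatMap (pvBuck l) := by
  induction l using List.reverseRecOn with
  | nil => rfl
  | append_singleton l x ih =>
    have hsort : PySem.List.sorted (l ++ [x]) pvSortKeyB =
        PySem.List.insertBy pvB x (PySem.List.sorted l pvSortKeyB) := by
      rw [PySem.List.sorted_eq_foldl_insertBy, PySem.List.sorted_eq_foldl_insertBy,
        List.foldl_append]
      rfl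
    have hofl : PySem.Set.ofList ((l ++ [x]).map pvSortKeyB) =
        PySem.Set.add (PySem.Set.ofList (l.map pvSortKeyB)) (pvSortKeyB x) := by
      rw [List.map_append, PySem.Set.ofList_eq_foldl, PySem.Set.ofList_eq_foldl,
        List.foldl_append]
      rfl
    rw [hsort, ih]
    by_cases hmem : pvSortKeyB x ∈ l.map pvSortKeyB
    · have hSI : pvSI (l ++ [x]) = pvSI l := by
        rw [pvSI, pvSI, hofl, PySem.Set.add,
          if_pos ((PySem.Set.contains_iff _ _).2 ((PySem.Set.mem_ofList _ _).2 hmem))]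
      rw [hSI]
      exact pvInsert_flatMap_mem _ _ _ (pvSI_pairwise l) (pvSI_ne l)
        ((pvSI_mem l _).2 hmem)
    · have hSI : pvSI (l ++ [x]) =
          PySem.List.insertBy (fun a c => decide (a < c)) (pvSortKeyB x) (pvSI l) := by
        rw [pvSI, pvSI, hofl, PySem.Set.add,
          if_neg (fun hc => hmem ((PySem.Set.mem_ofList _ _).1
            ((PySem.Set.contains_iff _ _).1 hc)))]
        rw [PySem.List.sorted_eq_foldl_insertBy, PySem.List.sorted_eq_foldl_insertBy,
          List.foldl_append]
        rfl
      rw [hSI]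
      exact pvInsert_flatMap_new _ _ _ (pvSI_pairwise l) (pvSI_ne l)
        (List.filter_eq_nil_iff.2 (fun k hk hbeq => hmem
          (List.mem_map.2 ⟨k, hk, by simpa using hbeq⟩)))
        (fun h => hmem ((pvSI_mem l _).1 h))

-- dedup distributes over the bucket concatenation (buckets are pairwise disjoint)
theorem pvDedup_flatMap_aux (ns : List Int) (l : List pvKeyT) (hinc : ns.Pairwise (· < ·)) :
    ∀ seen : List pvKeyT, (∀ a ∈ ns.flatMap (pvBuck l), seen.contains a = false) →
    pvDedupSeen seen (ns.flatMap (pvBuck l)) =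
      ns.flatMap (fun n => pvDedupSeen [] (pvBuck l n)) := by
  induction ns with
  | nil => intro _ _; rfl
  | cons n0 t ih =>
    intro seen hseen
    have hp := List.pairwise_cons.1 hinc
    rw [List.flatMap_cons, pvDedupSeen_append, List.flatMap_cons]
    refine congrArg₂ _ ?_ ?_
    · refine pvDedupSeen_congr_mem _ _ _ (fun a ha => ?_)
      rw [hseen a (by rw [List.flatMap_cons]; exact List.mem_append_left _ ha)]
      rfl
    · refine Eq.trans (ih hp.2 _ ?_) rfl
      intro a ha
      rcases List.mem_flatMap.1 ha with ⟨m, hm, ham⟩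
      have hga : pvSortKeyB a = m := pvBuck_key l m a ham
      have hanb : a ∉ pvBuck l n0 := fun hb => by
        have := pvBuck_key l n0 a hb
        have := hp.1 m hm
        omega
      rw [List.contains_append, pvContains_eq_false (fun h => hanb (List.mem_reverse.1 h)),
        hseen a (by rw [List.flatMap_cons]; exact List.mem_append_right _ ha)]
      rfl

theorem pvDedup_flatMap (ns : List Int) (l : List pvKeyT) (hinc : ns.Pairwise (· < ·)) :
    pvDedupSeen [] (ns.flatMap (pvBuck l)) =
      ns.flatMap (fun n => pvDedupSeen [] (pvBuck l n)) :=
  pvDedup_flatMap_aux ns l hinc [] (fun _ _ => rfl)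

-- B's bucket dict: keys and per-bucket contents
theorem pvBucketsKeys (ks : List pvKeyT) :
    ((ks.foldl (fun d k => d.modify (pvSortKeyB k) PySem.Dict.empty (fun b => b.insert k ()))
        PySem.Dict.empty).keys : List Int) = PySem.Set.ofList (ks.map pvSortKeyB) := by
  rw [PySem.Dict.keys_foldl_modify_key ks pvSortKeyB PySem.Dict.empty
    (fun _ k => fun b => b.insert k ()) PySem.Dict.empty]
  rw [PySem.Set.ofList_eq_foldl]
  rfl

theorem pvBucketsGetD (ks : List pvKeyT) :
    ∀ (d : PySem.Dict Int (PySem.Dict pvKeyT Unit)) (n : Int),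
    ((ks.foldl (fun d k => d.modify (pvSortKeyB k) PySem.Dict.empty (fun b => b.insert k ())) d).getD
        n PySem.Dict.empty) =
      (pvBuck ks n).foldl (fun b k => b.insert k ()) (d.getD n PySem.Dict.empty) := by
  induction ks with
  | nil => intro d n; rfl
  | cons k t ih =>
    intro d n
    rw [List.foldl_cons, ih]
    simp only [pvBuck, List.filter_cons]
    rw [PySem.Dict.getD_modify]
    cases hb : pvSortKeyB k == n
    · have hb' : ¬ n = pvSortKeyB k := fun h => by simp [h] at hb
      rw [if_neg hb']
      simp
    · have he : pvSortKeyB k = n := eq_of_beq hb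
      rw [if_pos he.symm, he]
      simp [List.foldl_cons]

theorem pvInnerKeys (l : List pvKeyT) :
    ((l.foldl (fun b k => b.insert k ()) PySem.Dict.empty).keys : List pvKeyT) =
      PySem.Set.ofList l := by
  rw [PySem.Dict.keys_foldl_insert l (fun _ _ => ()) PySem.Dict.empty,
    PySem.Set.ofList_eq_foldl]
  rfl

-- ===== VERDICT (by name: the statement is the Claim_ definition above) =====
theorem format_rewards_py_spec : Claim_equal_format_rewards_py := by
  intro rewards lang _ _
  unfold Spec_format_rewards_py format_rewards_py format_rewards_py_alt
  by_cases hnil : rewards = []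
  · subst hnil; rfl
  · rw [if_neg hnil]
    have hA : ((PySem.List.sorted rewards pvSortKeyA).foldl pvStepA (PySem.Set.empty, [])).2 =
        ((pvSI (rewards.map pvKey)).flatMap
          (fun n => pvDedupSeen [] (pvBuck (rewards.map pvKey) n))).map pvFormatLine := by
      rw [pvFoldA]
      rw [show (PySem.Set.empty : PySem.Set pvKeyT) = ([] : List pvKeyT) from rfl]
      rw [pvMap_sorted, pvSorted_buckets,
        pvDedup_flatMap _ _ (pvSI_pairwise (rewards.map pvKey))]
      simp
    have hfold : rewards.foldl pvStepB PySem.Dict.empty =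
        (rewards.map pvKey).foldl
          (fun d k => d.modify (pvSortKeyB k) PySem.Dict.empty (fun b => b.insert k ()))
          PySem.Dict.empty := by
      rw [List.foldl_map]
      rfl
    have hkeys : ((rewards.foldl pvStepB PySem.Dict.empty).keys : List Int) =
        PySem.Set.ofList ((rewards.map pvKey).map pvSortKeyB) := by
      rw [hfold, pvBucketsKeys]
    have hB : ((PySem.List.sorted ((rewards.foldl pvStepB PySem.Dict.empty).keys : List Int)
          (fun x => x)).flatMap
        (fun n => (((rewards.foldl pvStepB PySem.Dict.empty).getD n
            PySem.Dict.empty).keys : List pvKeyT).map pvFormatLine)) =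
        ((pvSI (rewards.map pvKey)).flatMap
          (fun n => pvDedupSeen [] (pvBuck (rewards.map pvKey) n))).map pvFormatLine := by
      rw [List.map_flatMap, hkeys]
      refine pvFlatMap_congr (fun n hn => ?_)
      rw [hfold, pvBucketsGetD, PySem.Dict.getD_empty, pvInnerKeys, pvOfList_eq]
    simp only [hA, hB]
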